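-- pv_equiv track=rewrite | github.com/a-v-kolos/Bioinf-utilities | modules/dna_rna_modules.py | is_nucleic_acid
-- ===== SOURCE A (Python) =====
-- def is_nucleic_acid(seq):
--
--     dna_nucleotides = {'A', 'T', 'G', 'C', 'a', 't', 'g', 'c'}
--     rna_nucleotides = {'A', 'U', 'G', 'C', 'a', 'u', 'g', 'c'}
--
--     is_dna = all(char in dna_nucleotides for char in seq)
--
--     is_rna = all(char in rna_nucleotides for char in seq)
--
--     has_t = any(char in {'T', 't'} for char in seq)
--     has_u = any(char in {'U', 'u'} for char in seq)
--
--     if has_t and has_u: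
--         return False
--
--     return is_dna or is_rna
-- ===== SOURCE B (Python) =====
-- def is_nucleic_acid(seq):
--     has_t = False
--     has_u = False
--     for ch in seq:
--         if ch in 'TtUu':
--             if ch in 'Tt':
--                 has_t = True
--             else:
--                 has_u = True
--             if has_t and has_u:
--                 return False
--         elif ch not in 'ACGacg':
--             return False
--     return True
-- ===== Notes on version B (the rewrite author's own statement) =====
-- stated objective: faster
-- what changed: B replaces A's four whole-string generator scans and subset logic by a single pass with an accumulator: a state machine tracking has_t/has_u that rejects immediately on a character outside the merged DNA/RNA alphabet or as soon as both T and U have been seen, so invalid inputs short-circuit instead of being scanned four times.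
import Mathlib
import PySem

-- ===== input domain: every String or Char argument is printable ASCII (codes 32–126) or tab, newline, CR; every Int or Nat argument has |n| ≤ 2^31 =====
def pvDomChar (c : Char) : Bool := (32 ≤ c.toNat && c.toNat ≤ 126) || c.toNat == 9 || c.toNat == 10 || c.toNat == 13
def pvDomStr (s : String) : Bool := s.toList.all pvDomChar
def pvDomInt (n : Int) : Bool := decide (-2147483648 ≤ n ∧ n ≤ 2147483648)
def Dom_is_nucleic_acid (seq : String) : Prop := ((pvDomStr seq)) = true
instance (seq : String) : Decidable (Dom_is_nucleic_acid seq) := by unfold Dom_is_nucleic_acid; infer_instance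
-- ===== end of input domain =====

-- B: a single pass with an accumulator (a has_t/has_u state machine with early exit) instead of A's four full scans; same value everywhere.
-- ===== PORT A =====
def is_nucleic_acid (seq : String) : Bool :=
  let dna_nucleotides : PySem.Set Char := PySem.Set.ofList ['A','T','G','C','a','t','g','c']
  let rna_nucleotides : PySem.Set Char := PySem.Set.ofList ['A','U','G','C','a','u','g','c']
  let is_dna := seq.toList.all (fun c => PySem.Set.contains dna_nucleotides c)
  let is_rna := seq.toList.all (fun c => PySem.Set.contains rna_nucleotides c)
  let has_t := seq.toList.any (fun c => PySem.Set.contains (PySem.Set.ofList ['T','t']) c)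
  let has_u := seq.toList.any (fun c => PySem.Set.contains (PySem.Set.ofList ['U','u']) c)
  if has_t && has_u then false
  else is_dna || is_rna

-- ===== PORT B =====
-- B's loop: walks the characters once, carrying the two flags; early return = stopping the recursion.
def is_nucleic_acid_alt_loop (cs : List Char) (has_t has_u : Bool) : Bool :=
  match cs with
  | [] => true
  | ch :: rest =>
    if "TtUu".toList.contains ch then
      let has_t' := if "Tt".toList.contains ch then true else has_t
      let has_u' := if "Tt".toList.contains ch then has_u else true
      if has_t' && has_u' then false
      else is_nucleic_acid_alt_loop rest has_t' has_u'
    else if !("ACGacg".toList.contains ch) then false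
    else is_nucleic_acid_alt_loop rest has_t has_u

def is_nucleic_acid_alt (seq : String) : Bool :=
  is_nucleic_acid_alt_loop seq.toList false false

-- ===== PRECONDITION & SPEC =====
def Spec_is_nucleic_acid (seq : String) (out : Bool) : Prop := out = is_nucleic_acid_alt seq
instance (seq : String) (out : Bool) : Decidable (Spec_is_nucleic_acid seq out) := by unfold Spec_is_nucleic_acid; infer_instance

-- ===== CLAIM (what is proved, stated in full; the proofs are below) =====
def Claim_equal_is_nucleic_acid : Prop := ∀ (seq : String), Dom_is_nucleic_acid seq → Spec_is_nucleic_acid seq (is_nucleic_acid seq)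

-- ===== LEMMAS AND PROOFS =====

-- per-character flags: T/t, U/u, A/C/G in either case
def pvBt (c : Char) : Bool := ['T','t'].contains c
def pvBu (c : Char) : Bool := ['U','u'].contains c
def pvBa (c : Char) : Bool := ['A','C','G','a','c','g'].contains c

lemma strTt : "Tt".toList = ['T','t'] := by decide
lemma strTtUu : "TtUu".toList = ['T','t','U','u'] := by decide
lemma strACGacg : "ACGacg".toList = ['A','C','G','a','c','g'] := by decide

lemma tu_split (c : Char) : "TtUu".toList.contains c = (pvBt c || pvBu c) := by
  rw [strTtUu, Bool.eq_iff_iff]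
  simp [pvBt, pvBu, List.contains_eq_mem]; tauto

lemma dna_split (c : Char) :
    PySem.Set.contains (PySem.Set.ofList ['A','T','G','C','a','t','g','c']) c
      = (pvBt c || pvBa c) := by
  rw [Bool.eq_iff_iff]
  simp [pvBt, pvBa, PySem.Set.contains, PySem.Set.ofList, List.contains_eq_mem]; tauto

lemma rna_split (c : Char) :
    PySem.Set.contains (PySem.Set.ofList ['A','U','G','C','a','u','g','c']) c
      = (pvBu c || pvBa c) := by
  rw [Bool.eq_iff_iff]
  simp [pvBu, pvBa, PySem.Set.contains, PySem.Set.ofList, List.contains_eq_mem]; tauto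

lemma t_split (c : Char) :
    PySem.Set.contains (PySem.Set.ofList ['T','t']) c = pvBt c := by
  rw [Bool.eq_iff_iff]
  simp [pvBt, PySem.Set.contains, PySem.Set.ofList, List.contains_eq_mem]

lemma u_split (c : Char) :
    PySem.Set.contains (PySem.Set.ofList ['U','u']) c = pvBu c := by
  rw [Bool.eq_iff_iff]
  simp [pvBu, PySem.Set.contains, PySem.Set.ofList, List.contains_eq_mem]

lemma bt_bu (c : Char) (h : pvBt c = true) : pvBu c = false := by
  simp only [pvBt, pvBu, List.contains_eq_mem, decide_eq_true_eq, List.mem_cons,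
    List.not_mem_nil, or_false] at h ⊢
  rcases h with h | h <;> subst h <;> decide

-- closed characterisation of B's loop on its reachable states (both flags never set together)
lemma alt_loop_char (cs : List Char) (ht hu : Bool) (hflags : (ht && hu) = false) :
    is_nucleic_acid_alt_loop cs ht hu =
      (cs.all (fun c => pvBt c || pvBu c || pvBa c)
        && !((ht || cs.any pvBt) && (hu || cs.any pvBu))) := by
  induction cs generalizing ht hu with
  | nil => simp [is_nucleic_acid_alt_loop]; cases ht <;> cases hu <;> simp_all
  | cons c rest ih =>
    unfold is_nucleic_acid_alt_loop
    rw [tu_split]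
    simp only [show "Tt".toList.contains c = pvBt c from by rw [strTt]; rfl,
      show "ACGacg".toList.contains c = pvBa c from by rw [strACGacg]; rfl]
    by_cases hbt : pvBt c = true
    · have hbu : pvBu c = false := bt_bu c hbt
      cases hu with
      | true =>
        have hht : ht = false := by cases ht <;> simp_all
        simp [hbt, hbu, hht]
      | false =>
        simp only [hbt, hbu, Bool.true_or, if_true, List.all_cons, List.any_cons]
        rw [ih true false (by simp)]
        simp
    · have hbt' : pvBt c = false := by simpa using hbt
      by_cases hbu : pvBu c = true
      · cases ht with
        | true =>
          have hhu : hu = false := by cases hu <;> simp_all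
          simp [hbt', hbu, hhu]
        | false =>
          simp only [hbt', hbu, Bool.false_or, if_true, List.all_cons, List.any_cons,
            Bool.false_eq_true, if_false]
          rw [ih false true (by simp)]
          simp
      · have hbu' : pvBu c = false := by simpa using hbu
        by_cases hba : pvBa c = true
        · simp only [hbt', hbu', hba, Bool.or_self, Bool.false_eq_true, if_false,
            Bool.not_true, List.all_cons, List.any_cons]
          rw [ih ht hu hflags]
          simp
        · have hba' : pvBa c = false := by simpa using hba
          simp [hbt', hbu', hba']

lemma all_or_of_all (l : List Char) (f g : Char → Bool) (h : l.all g = true) :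
    l.all (fun c => f c || g c) = true := by
  simp only [List.all_eq_true] at h ⊢
  intro c hc; simp [h c hc]

lemma all_congr_of_any_false (l : List Char) (f g h : Char → Bool)
    (hany : l.any h = false) (heq : ∀ c, h c = false → f c = g c) :
    l.all f = l.all g := by
  simp only [List.any_eq_false] at hany
  induction l with
  | nil => rfl
  | cons c rest ih =>
    simp only [List.all_cons]
    rw [heq c (by simpa using hany c (by simp)), ih (fun x hx => hany x (by simp [hx]))]

-- ===== VERDICT (by name: the statement is the Claim_ definition above) =====
theorem is_nucleic_acid_spec : Claim_equal_is_nucleic_acid := by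
  intro seq _
  unfold Spec_is_nucleic_acid is_nucleic_acid is_nucleic_acid_alt
  rw [alt_loop_char _ false false rfl]
  simp only [dna_split, rna_split, t_split, u_split, Bool.false_or]
  set l := seq.toList with hl
  by_cases hT : l.any pvBt = true
  · by_cases hU : l.any pvBu = true
    · simp [hT, hU]
    · have hU' : l.any pvBu = false := by simpa using hU
      have hdna : l.all (fun c => pvBu c || pvBa c) = l.all pvBa :=
        all_congr_of_any_false l _ _ pvBu hU' (fun c hc => by simp [hc])
      have hres : l.all (fun c => pvBt c || pvBu c || pvBa c)
          = l.all (fun c => pvBt c || pvBa c) :=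
        all_congr_of_any_false l _ _ pvBu hU' (fun c hc => by simp [hc])
      rw [hT, hU', hdna, hres]
      by_cases hba : l.all pvBa = true
      · rw [hba, all_or_of_all l pvBt pvBa hba]; simp
      · have : l.all pvBa = false := by simpa using hba
        rw [this]; simp
  · have hT' : l.any pvBt = false := by simpa using hT
    have hrna : l.all (fun c => pvBt c || pvBa c) = l.all pvBa :=
      all_congr_of_any_false l _ _ pvBt hT' (fun c hc => by simp [hc])
    have hres : l.all (fun c => pvBt c || pvBu c || pvBa c)
        = l.all (fun c => pvBu c || pvBa c) :=
      all_congr_of_any_false l _ _ pvBt hT' (fun c hc => by simp [hc])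
    rw [hT', hrna, hres]
    by_cases hba : l.all pvBa = true
    · rw [hba, all_or_of_all l pvBu pvBa hba]; simp
    · have : l.all pvBa = false := by simpa using hba
      rw [this]; simp
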